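-- pv_equiv track=rewrite | github.com/lennylv/ctP2ISP | code/predict.py | get_minibatches
-- ===== SOURCE A (Python) =====
-- def get_minibatches(n, minibatch_size, lens_index):
--     minibatches = []
--     indeies_of_s, index_of_s= [], []
--     tmp = 0
--     for i,len_index in enumerate(lens_index) :
--         if tmp + len_index <= minibatch_size:
--             index_of_s.append(i)
--             tmp = tmp + len_index
--         else:
--             assert tmp != 0,'The batch size is too small!'
--             indeies_of_s.append(index_of_s)
--             index_of_s = [i]
--             tmp = len_index
--     indeies_of_s.append(index_of_s)
--     sum_i = 0
--     res_index = []
--     for i in indeies_of_s: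
--         batch,res_i,sum_ii = [], [], 0
--         for j in i:
--             batch.extend([k for k in range(sum_i,sum_i+lens_index[j])])
--             res_i.append([k for k in range(sum_ii,sum_ii+lens_index[j])])
--             sum_i = sum_i+lens_index[j]
--             sum_ii = sum_ii+lens_index[j]
--         minibatches.append(batch)
--         res_index.append(res_i)
--     return minibatches,res_index
-- ===== SOURCE B (Python) =====
-- def get_minibatches(n, minibatch_size, lens_index):
--     # One pass: never build index groups; emit ranges directly while scanning.
--     minibatches, res_index = [], []
--     batch, res_i = [], []
--     global_offset, local_offset = 0, 0
--     for length in lens_index: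
--         if local_offset + length > minibatch_size:
--             assert local_offset != 0, 'The batch size is too small!'
--             minibatches.append(batch)
--             res_index.append(res_i)
--             batch, res_i, local_offset = [], [], 0
--         batch.extend(range(global_offset, global_offset + length))
--         res_i.append(list(range(local_offset, local_offset + length)))
--         global_offset += length
--         local_offset += length
--     minibatches.append(batch)
--     res_index.append(res_i)
--     return minibatches, res_index
-- ===== Notes on version B (the rewrite author's own statement) =====
-- stated objective: simpler
-- what changed: Replaces A's two-phase approach (first greedily group indices into lists, then a second nested pass that re-reads lens_index[j] to materialize global/local ranges) with a single pass that never builds index groups: it maintains a global and a per-batch local offset and emits the ranges directly, flushing the current batch when it would overflow.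
import Mathlib
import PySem

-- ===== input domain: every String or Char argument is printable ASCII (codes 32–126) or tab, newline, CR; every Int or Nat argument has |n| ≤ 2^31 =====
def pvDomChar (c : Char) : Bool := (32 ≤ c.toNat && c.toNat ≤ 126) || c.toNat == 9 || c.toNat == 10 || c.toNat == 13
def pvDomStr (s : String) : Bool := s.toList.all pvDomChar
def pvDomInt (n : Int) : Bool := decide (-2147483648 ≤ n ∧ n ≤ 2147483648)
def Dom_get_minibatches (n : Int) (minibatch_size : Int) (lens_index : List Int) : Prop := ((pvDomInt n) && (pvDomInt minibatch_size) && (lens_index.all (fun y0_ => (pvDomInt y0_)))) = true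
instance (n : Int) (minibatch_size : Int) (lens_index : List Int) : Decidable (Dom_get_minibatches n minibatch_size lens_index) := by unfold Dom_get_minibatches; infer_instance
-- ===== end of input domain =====

-- B is the same-cost one-pass rewrite of A (no index groups, ranges emitted directly); equivalence of return values is proved on Pre_ (where A's assert does not fire).

-- ===== PORT A =====
-- first loop: state (indeies_of_s, index_of_s, tmp); the assert branch is ported as the flush it performs when the assert passes (inputs where it fires are outside Pre_)
def pvStep1 (m : Int) (s : List (List Int) × List Int × Int) (p : Int × Int) :
    List (List Int) × List Int × Int :=
  if s.2.2 + p.2 ≤ m then (s.1, s.2.1 ++ [p.1], s.2.2 + p.2)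
  else (s.1 ++ [s.2.1], [p.1], p.2)

-- inner loop of the second phase: state (batch, res_i, sum_i, sum_ii); lens_index[j] is in range on every j the first loop stored
def pvStepI (lens : List Int) (s : List Int × List (List Int) × Int × Int) (j : Int) :
    List Int × List (List Int) × Int × Int :=
  let L := PySem.List.pyGetD lens j 0
  (s.1 ++ PySem.List.pyRange s.2.2.1 (s.2.2.1 + L) 1,
   s.2.1 ++ [PySem.List.pyRange s.2.2.2 (s.2.2.2 + L) 1],
   s.2.2.1 + L, s.2.2.2 + L)

-- outer loop of the second phase: state (minibatches, res_index, sum_i)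
def pvStep2 (lens : List Int) (s : List (List Int) × List (List (List Int)) × Int) (grp : List Int) :
    List (List Int) × List (List (List Int)) × Int :=
  let t := grp.foldl (pvStepI lens) ([], [], s.2.2, 0)
  (s.1 ++ [t.1], s.2.1 ++ [t.2.1], t.2.2.1)

def get_minibatches (n : Int) (minibatch_size : Int) (lens_index : List Int) :
    List (List Int) × List (List (List Int)) :=
  let f := (PySem.List.enumerate lens_index 0).foldl (pvStep1 minibatch_size) ([], [], 0)
  let groups := f.1 ++ [f.2.1]
  let r := groups.foldl (pvStep2 lens_index) ([], [], 0)
  (r.1, r.2.1)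

-- ===== PORT B =====
-- one pass: state (minibatches, res_index, batch, res_i, global_offset, local_offset); the assert is a no-op on Pre_
def pvStepB (m : Int)
    (s : List (List Int) × List (List (List Int)) × List Int × List (List Int) × Int × Int)
    (L : Int) :
    List (List Int) × List (List (List Int)) × List Int × List (List Int) × Int × Int :=
  match s with
  | (mb, res, batch, resi, g, loc) =>
    let t := if m < loc + L then (mb ++ [batch], res ++ [resi], ([] : List Int), ([] : List (List Int)), (0 : Int))
             else (mb, res, batch, resi, loc)
    match t with
    | (mb, res, batch, resi, loc) =>
      (mb, res, batch ++ PySem.List.pyRange g (g + L) 1,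
       resi ++ [PySem.List.pyRange loc (loc + L) 1], g + L, loc + L)

def get_minibatches_alt (n : Int) (minibatch_size : Int) (lens_index : List Int) :
    List (List Int) × List (List (List Int)) :=
  let s := lens_index.foldl (pvStepB minibatch_size) ([], [], [], [], 0, 0)
  (s.1 ++ [s.2.2.1], s.2.1 ++ [s.2.2.2.1])

-- ===== PRECONDITION & SPEC =====
-- pvAssertOk replays exactly A's running batch total tmp and is false exactly where A's `assert tmp != 0` fires (AssertionError)
def pvAssertOk (m : Int) : List Int → Int → Bool
  | [], _ => true
  | L :: rest, tmp =>
    if tmp + L ≤ m then pvAssertOk m rest (tmp + L)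
    else (decide (tmp ≠ 0) && pvAssertOk m rest L)

-- Pre_ excludes exactly the inputs on which the Python A (and B alike) raises AssertionError ('The batch size is too small!')
def Pre_get_minibatches (n : Int) (minibatch_size : Int) (lens_index : List Int) : Prop :=
  pvAssertOk minibatch_size lens_index 0 = true
instance (n : Int) (minibatch_size : Int) (lens_index : List Int) : Decidable (Pre_get_minibatches n minibatch_size lens_index) := by unfold Pre_get_minibatches; infer_instance

def pvWitness_get_minibatches : Int × Int × List Int := (0, 5, [2, 3, 1])

def Spec_get_minibatches (n : Int) (minibatch_size : Int) (lens_index : List Int) (out : List (List Int) × List (List (List Int))) : Prop := out = get_minibatches_alt n minibatch_size lens_index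
instance (n : Int) (minibatch_size : Int) (lens_index : List Int) (out : List (List Int) × List (List (List Int))) : Decidable (Spec_get_minibatches n minibatch_size lens_index out) := by unfold Spec_get_minibatches; infer_instance

-- ===== CLAIM (what is proved, stated in full; the proofs are below) =====
def Claim_equal_get_minibatches : Prop := ∀ (n : Int) (minibatch_size : Int) (lens_index : List Int), Dom_get_minibatches n minibatch_size lens_index → Pre_get_minibatches n minibatch_size lens_index → Spec_get_minibatches n minibatch_size lens_index (get_minibatches n minibatch_size lens_index)

-- ===== LEMMAS AND PROOFS =====

-- The ports agree from any pair of related states; the kernel relation: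
-- (mb, res, gacc) materializes acc, (batch, resi, g, loc) materializes cur from gacc, and loc = tmp.
theorem pv_key (m : Int) (lens : List Int) :
    ∀ (pairs : List (Int × Int)),
      (∀ p ∈ pairs, PySem.List.pyGetD lens p.1 0 = p.2) →
      ∀ (acc : List (List Int)) (cur : List Int) (tmp : Int)
        (mb : List (List Int)) (res : List (List (List Int)))
        (batch : List Int) (resi : List (List Int)) (g loc gacc : Int),
        acc.foldl (pvStep2 lens) ([], [], 0) = (mb, res, gacc) →
        cur.foldl (pvStepI lens) ([], [], gacc, 0) = (batch, resi, g, loc) →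
        loc = tmp →
        (let f := pairs.foldl (pvStep1 m) (acc, cur, tmp)
         let r := (f.1 ++ [f.2.1]).foldl (pvStep2 lens) ([], [], 0)
         ((r.1, r.2.1) : List (List Int) × List (List (List Int)))) =
        (let s := (pairs.map (·.2)).foldl (pvStepB m) (mb, res, batch, resi, g, loc)
         (s.1 ++ [s.2.2.1], s.2.1 ++ [s.2.2.2.1])) := by
  intro pairs
  induction pairs with
  | nil =>
    intro _ acc cur tmp mb res batch resi g loc gacc h1 h2 hloc
    simp only [List.foldl_nil, List.map_nil, List.foldl_append, List.foldl_cons, h1]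
    simp [pvStep2, h2]
  | cons p rest ih =>
    intro hmem acc cur tmp mb res batch resi g loc gacc h1 h2 hloc
    obtain ⟨i, L⟩ := p
    have hL : PySem.List.pyGetD lens i 0 = L := hmem (i, L) (by simp)
    have hrest : ∀ q ∈ rest, PySem.List.pyGetD lens q.1 0 = q.2 := fun q hq => hmem q (by simp [hq])
    simp only [List.map_cons, List.foldl_cons]
    by_cases hc : tmp + L ≤ m
    · -- append to the current batch on both sides
      have hA : pvStep1 m (acc, cur, tmp) (i, L) = (acc, cur ++ [i], tmp + L) := by
        simp [pvStep1, hc]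
      have hB : pvStepB m (mb, res, batch, resi, g, loc) L =
          (mb, res, batch ++ PySem.List.pyRange g (g + L) 1,
           resi ++ [PySem.List.pyRange loc (loc + L) 1], g + L, loc + L) := by
        have hnc : ¬ m < loc + L := by omega
        simp [pvStepB, hnc]
      rw [hA, hB]
      exact ih hrest acc (cur ++ [i]) (tmp + L) mb res _ _ (g + L) (loc + L) gacc h1
        (by simp [List.foldl_append, h2, pvStepI, hL]) (by omega)
    · -- flush, then start a fresh batch with this item on both sides
      have hA : pvStep1 m (acc, cur, tmp) (i, L) = (acc ++ [cur], [i], L) := by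
        simp [pvStep1, hc]
      have hB : pvStepB m (mb, res, batch, resi, g, loc) L =
          (mb ++ [batch], res ++ [resi], PySem.List.pyRange g (g + L) 1,
           [PySem.List.pyRange 0 L 1], g + L, L) := by
        have : m < loc + L := by omega
        simp [pvStepB, this]
      rw [hA, hB]
      refine ih hrest (acc ++ [cur]) [i] L (mb ++ [batch]) (res ++ [resi]) _ _ (g + L) L g
        ?_ ?_ rfl
      · simp [List.foldl_append, h1, pvStep2, h2]
      · simp [pvStepI, hL]

theorem pv_enum_lookup (lens : List Int) :
    ∀ p ∈ PySem.List.enumerate lens 0, PySem.List.pyGetD lens p.1 0 = p.2 := by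
  intro p hp
  rcases (PySem.List.mem_enumerate_iff lens 0 p).1 hp with ⟨k, hk, rfl⟩
  simp [PySem.List.pyGetD_natCast, List.getD_eq_getElem?_getD, hk]

-- ===== VERDICT (by name: the statement is the Claim_ definition above) =====
theorem get_minibatches_spec : Claim_equal_get_minibatches := by
  intro n m lens _ _
  unfold Spec_get_minibatches get_minibatches get_minibatches_alt
  have := pv_key m lens (PySem.List.enumerate lens 0) (pv_enum_lookup lens)
    [] [] 0 [] [] [] [] 0 0 0 rfl rfl rfl
  simpa [PySem.List.map_snd_enumerate] using this
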